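-- pv_equiv track=rewrite | github.com/Deepak-Laksman/DSA-Implementations-Python | BitManipulation/totalHammingDistance.py | calculateHammingDistance
-- ===== SOURCE A (Python) =====
-- def calculateHammingDistance(n, array):
--     totalDistance = 0
--     countOfZeroes = 0
--     for i in range(32):
--         countOfZeroes = 0
--         for j in range(n):
--             if (array[j] & (1 << i)) == 0:
--                 countOfZeroes += 1
--         if (n - countOfZeroes != 0) and (n - countOfZeroes != n):
--             totalDistance += max(n - countOfZeroes, countOfZeroes)
--     return totalDistance
-- ===== SOURCE B (Python) =====
-- def calculateHammingDistance(n, array):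
--     freq = {}
--     for j in range(n):
--         v = array[j]
--         freq[v] = freq.get(v, 0) + 1
--     total = 0
--     for i in range(32):
--         ones = 0
--         for v, c in freq.items():
--             if v & (1 << i):
--                 ones += c
--         if 0 < ones < n:
--             total += n - min(ones, n - ones)
--     return total
-- ===== Notes on version B (the rewrite author's own statement) =====
-- stated objective: alternative
-- what changed: B first compresses the first n elements into a value->multiplicity frequency dict, then counts per-bit ones by scanning only the distinct values weighted by multiplicity and adds n - min(ones, n-ones) for mixed bits, instead of A's 32 full rescans of the raw array counting zeros and adding max(n-zeroCount, zeroCount).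
import Mathlib
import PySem

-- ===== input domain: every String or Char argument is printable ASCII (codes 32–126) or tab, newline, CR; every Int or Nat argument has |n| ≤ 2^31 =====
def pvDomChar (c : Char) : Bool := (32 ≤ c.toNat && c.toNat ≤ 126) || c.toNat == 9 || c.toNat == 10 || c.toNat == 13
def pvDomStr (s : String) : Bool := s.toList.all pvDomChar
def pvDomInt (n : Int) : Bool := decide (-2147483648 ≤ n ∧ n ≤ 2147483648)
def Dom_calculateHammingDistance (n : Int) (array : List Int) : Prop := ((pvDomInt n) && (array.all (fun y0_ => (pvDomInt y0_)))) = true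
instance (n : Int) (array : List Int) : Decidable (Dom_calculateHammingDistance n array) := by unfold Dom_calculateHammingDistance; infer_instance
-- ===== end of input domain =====

-- B compresses the first n elements into a value → multiplicity frequency dict once, then counts
-- per-bit ones over the DISTINCT values weighted by multiplicity and adds n - min(ones, n - ones)
-- for mixed bits; A instead rescans the whole raw array once per bit position counting zeros
-- and adds max(n - zeros, zeros). Alternative data structure / decomposition, same exact result.

-- ===== PORT A =====
-- the bit mask 1 << i (shared helper; both Pythons write '1 << i')
def pvMask (i : Int) : Int := (1 : Int) <<< i.toNat

def calculateHammingDistance (n : Int) (array : List Int) : Int :=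
  (PySem.List.pyRange 0 32 1).foldl
    (fun totalDistance i =>
      let countOfZeroes :=
        (PySem.List.pyRange 0 n 1).foldl
          (fun c j =>
            if PySem.Int.band (PySem.List.pyGetD array j 0) (pvMask i) = 0
            then c + 1 else c) 0
      if (n - countOfZeroes ≠ 0) ∧ (n - countOfZeroes ≠ n)
      then totalDistance + max (n - countOfZeroes) countOfZeroes
      else totalDistance)
    0

-- ===== PORT B =====
def calculateHammingDistance_alt (n : Int) (array : List Int) : Int :=
  let freq : PySem.Dict Int Int :=
    (PySem.List.pyRange 0 n 1).foldl
      (fun d j =>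
        let v := PySem.List.pyGetD array j 0
        d.insert v (d.getD v 0 + 1))
      PySem.Dict.empty
  (PySem.List.pyRange 0 32 1).foldl
    (fun total i =>
      let ones :=
        freq.items.foldl
          (fun ones vc =>
            if PySem.Int.band vc.1 (pvMask i) ≠ 0 then ones + vc.2 else ones) 0
      if 0 < ones ∧ ones < n then total + (n - min ones (n - ones)) else total)
    0

-- ===== PRECONDITION & SPEC =====
-- Pre_ excludes exactly the inputs where A raises IndexError: n larger than len(array).
def Pre_calculateHammingDistance (n : Int) (array : List Int) : Prop := n ≤ (array.length : Int)
instance (n : Int) (array : List Int) : Decidable (Pre_calculateHammingDistance n array) := by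
  unfold Pre_calculateHammingDistance; infer_instance
def pvWitness_calculateHammingDistance : Int × List Int := (3, [1, 2, 3])

def Spec_calculateHammingDistance (n : Int) (array : List Int) (out : Int) : Prop := out = calculateHammingDistance_alt n array
instance (n : Int) (array : List Int) (out : Int) : Decidable (Spec_calculateHammingDistance n array out) := by unfold Spec_calculateHammingDistance; infer_instance

-- ===== CLAIM (what is proved, stated in full; the proofs are below) =====
def Claim_equal_calculateHammingDistance : Prop := ∀ (n : Int) (array : List Int), Dom_calculateHammingDistance n array → Pre_calculateHammingDistance n array → Spec_calculateHammingDistance n array (calculateHammingDistance n array)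

-- ===== LEMMAS AND PROOFS =====

-- the first n elements, as a list
def pvElems (n : Int) (array : List Int) : List Int :=
  (PySem.List.pyRange 0 n 1).map (fun j => PySem.List.pyGetD array j 0)

-- 'bit i of v is set', the test both programs make
def pvBitOne (i : Int) (v : Int) : Bool := PySem.Int.band v (pvMask i) ≠ 0

-- B's frequency dict is Counter(first n elements)
lemma freq_eq_counter (n : Int) (array : List Int) :
    (PySem.List.pyRange 0 n 1).foldl
      (fun d j =>
        let v := PySem.List.pyGetD array j 0
        d.insert v (d.getD v 0 + 1))
      PySem.Dict.empty
    = PySem.Dict.counter (pvElems n array) := by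
  rw [← PySem.Dict.foldl_insert_getD_add_one_eq_counter, pvElems, List.foldl_map]

-- summing multiplicities of the distinct values satisfying q is counting q over the list
lemma sum_count_over_set (xs : List Int) (q : Int → Bool) :
    (((PySem.Set.ofList xs).filter q).map (fun k => ((xs.count k : Nat) : Int))).sum
      = (xs.countP q : Int) := by
  have hperm : (PySem.Set.ofList xs).Perm xs.dedup :=
    (List.perm_ext_iff_of_nodup (PySem.Set.nodup_ofList xs) xs.nodup_dedup).mpr
      (by intro a; simp [PySem.Set.mem_ofList, List.mem_dedup])
  have h1 := ((hperm.filter q).map (fun k => ((xs.count k : Nat) : Int))).sum_eq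
  rw [h1]
  have h2 : (fun k => ((xs.count k : Nat) : Int)) = (fun m : Nat => (m : Int)) ∘ (xs.count ·) := rfl
  rw [h2, ← List.map_map, ← Nat.cast_list_sum, List.sum_map_count_dedup_filter_eq_countP]

-- B's inner loop over the dict items counts the set bits over the first n elements
lemma onesB (n : Int) (array : List Int) (i : Int) :
    (PySem.Dict.counter (pvElems n array)).items.foldl
      (fun ones vc =>
        if PySem.Int.band vc.1 (pvMask i) ≠ 0 then ones + vc.2 else ones) 0
    = ((pvElems n array).countP (pvBitOne i) : Int) := by
  rw [PySem.Dict.items_counter, List.foldl_map,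
    PySem.List.foldl_ite_eq_foldl_filter
      (p := fun k => PySem.Int.band k (pvMask i) ≠ 0)
      (f := fun (s : Int) k => s + ((pvElems n array).count k : Int)),
    PySem.List.foldl_add (g := fun k => ((pvElems n array).count k : Int)), zero_add]
  have : (fun k => decide (PySem.Int.band k (pvMask i) ≠ 0)) = pvBitOne i := rfl
  rw [this, sum_count_over_set]

-- A's inner loop is a countP of the zero-bit test over the first n elements
lemma countA (array : List Int) (i : Int) :
    ∀ (js : List Int) (c : Int),
      js.foldl (fun c j => if PySem.Int.band (PySem.List.pyGetD array j 0) (pvMask i) = 0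
                           then c + 1 else c) c
      = c + ((js.map (fun j => PySem.List.pyGetD array j 0)).countP (fun v => !(pvBitOne i v)) : Int) := by
  intro js
  induction js with
  | nil => intro c; simp
  | cons j js ih =>
    intro c
    simp only [List.foldl_cons, List.map_cons, List.countP_cons, ih]
    by_cases h : PySem.Int.band (PySem.List.pyGetD array j 0) (pvMask i) = 0
    · simp only [pvBitOne, h, if_pos, ne_eq, decide_not, not_true_eq_false, decide_false,
        Bool.not_false]
      push_cast; ring
    · simp [pvBitOne, h]

-- the per-bit contribution agrees: zeros side with max vs ones side with min
lemma scalarStep (n Z O acc : Int) (hZ : 0 ≤ Z) (hO : 0 ≤ O) (hsum : Z + O = max n 0) :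
    (if (n - Z ≠ 0) ∧ (n - Z ≠ n) then acc + max (n - Z) Z else acc)
    = (if 0 < O ∧ O < n then acc + (n - min O (n - O)) else acc) := by
  split_ifs with h1 h2 h2 <;> omega

-- the two outer passes produce the same total, bit position by bit position
lemma foldMain (n : Int) (array : List Int) :
    ∀ (ks : List Nat) (acc : Int),
      (ks.map Int.ofNat).foldl
        (fun totalDistance i =>
          let countOfZeroes :=
            (PySem.List.pyRange 0 n 1).foldl
              (fun c j =>
                if PySem.Int.band (PySem.List.pyGetD array j 0) (pvMask i) = 0
                then c + 1 else c) 0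
          if (n - countOfZeroes ≠ 0) ∧ (n - countOfZeroes ≠ n)
          then totalDistance + max (n - countOfZeroes) countOfZeroes
          else totalDistance) acc
      = (ks.map Int.ofNat).foldl
          (fun total i =>
            let ones :=
              (PySem.Dict.counter (pvElems n array)).items.foldl
                (fun ones vc =>
                  if PySem.Int.band vc.1 (pvMask i) ≠ 0 then ones + vc.2 else ones) 0
            if 0 < ones ∧ ones < n then total + (n - min ones (n - ones)) else total) acc := by
  intro ks
  induction ks with
  | nil => intro acc; rfl
  | cons k ks ih =>
    intro acc
    simp only [List.map_cons, List.foldl_cons]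
    rw [← ih]
    congr 1
    rw [countA array (Int.ofNat k), zero_add, onesB n array (Int.ofNat k)]
    have hlen := List.length_eq_countP_add_countP (pvBitOne (Int.ofNat k)) (l := pvElems n array)
    have hfun : (fun a => decide ¬pvBitOne (Int.ofNat k) a = true)
        = (fun v => !(pvBitOne (Int.ofNat k) v)) := by
      funext a; cases pvBitOne (Int.ofNat k) a <;> simp
    rw [hfun] at hlen
    have hlen2 : (pvElems n array).length = (PySem.List.pyRange 0 n 1).length := by
      simp [pvElems]
    rw [hlen2, PySem.List.length_pyRange_one] at hlen
    have hsum : ((pvElems n array).countP (fun v => !(pvBitOne (Int.ofNat k) v)) : Int)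
        + ((pvElems n array).countP (pvBitOne (Int.ofNat k)) : Int) = max n 0 := by omega
    exact scalarStep n _ _ acc (Int.natCast_nonneg _) (Int.natCast_nonneg _) hsum

-- ===== VERDICT (by name: the statement is the Claim_ definition above) =====
theorem calculateHammingDistance_spec : Claim_equal_calculateHammingDistance := by
  intro n array _ _
  unfold Spec_calculateHammingDistance calculateHammingDistance calculateHammingDistance_alt
  rw [freq_eq_counter]
  have h32 : PySem.List.pyRange 0 32 1 = (List.range 32).map Int.ofNat := by decide
  rw [h32]
  exact foldMain n array (List.range 32) 0
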